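-- pv_equiv track=rewrite | github.com/Maximusprime3/MAPF_LNS_SAT | Analysis/visualize_mapf_solution.py | build_positions_per_timestep
-- ===== SOURCE A (Python) =====
-- from typing import Dict, List, Sequence, Tuple
--
-- Position = Tuple[int, int]
--
-- AgentPaths = Dict[int, List[Position]]
--
-- def build_positions_per_timestep(agent_paths: AgentPaths) -> Tuple[List[int], List[List[Position]]]:
--     agent_ids = sorted(agent_paths.keys())
--     max_timesteps = max(len(path) for path in agent_paths.values())
--
--     frame_positions: List[List[Position]] = []
--     for timestep in range(max_timesteps):
--         positions: List[Position] = []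
--         for agent_id in agent_ids:
--             path = agent_paths[agent_id]
--             if timestep < len(path):
--                 positions.append(path[timestep])
--             else:
--                 positions.append(path[-1])
--         frame_positions.append(positions)
--
--     return agent_ids, frame_positions
-- ===== SOURCE B (Python) =====
-- def build_positions_per_timestep(agent_paths):
--     agent_ids = sorted(agent_paths.keys())
--     max_timesteps = max(len(path) for path in agent_paths.values())
--     rows = []
--     for _, path in sorted(agent_paths.items(), key=lambda kv: kv[0]):
--         if len(path) == max_timesteps:
--             rows.append(path)
--         else:
--             rows.append(path + [path[-1]] * (max_timesteps - len(path)))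
--     frame_positions = [list(col) for col in zip(*rows)]
--     return agent_ids, frame_positions
-- ===== Notes on version B (the rewrite author's own statement) =====
-- stated objective: alternative
-- what changed: A builds each frame timestep-by-timestep with an inner per-agent dict lookup and inline padding; B instead sorts the items once (no per-agent lookups), pads each agent's path to full length, and transposes the padded rows into frames with zip(*rows), inverting the loop nesting.
-- outside the precondition, e.g. on build_positions_per_timestep({}): A raises ValueError, B raises ValueError; on build_positions_per_timestep({1: [], 2: [(0, 0)]}): A raises IndexError, B raises IndexError
import Mathlib
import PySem

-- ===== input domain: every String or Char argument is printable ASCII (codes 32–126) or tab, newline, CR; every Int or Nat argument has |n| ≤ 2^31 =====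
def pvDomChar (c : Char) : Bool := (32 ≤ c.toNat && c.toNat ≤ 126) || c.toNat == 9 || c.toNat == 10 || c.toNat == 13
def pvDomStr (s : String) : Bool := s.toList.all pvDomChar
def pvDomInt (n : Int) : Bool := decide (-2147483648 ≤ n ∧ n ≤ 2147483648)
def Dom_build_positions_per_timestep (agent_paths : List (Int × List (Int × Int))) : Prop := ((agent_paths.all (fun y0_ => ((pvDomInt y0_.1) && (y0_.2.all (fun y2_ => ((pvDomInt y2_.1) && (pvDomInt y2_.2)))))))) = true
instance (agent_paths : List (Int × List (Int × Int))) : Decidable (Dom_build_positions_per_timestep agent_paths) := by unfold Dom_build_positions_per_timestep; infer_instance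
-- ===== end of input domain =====

-- B sorts the items once (no per-agent dict lookups), pads each path to full length, and peels the
-- first column off the padded rows repeatedly to form frames (objective: alternative decomposition;
-- return value only).


-- ===== PORT A =====
-- dict lookup agent_paths[agent_id]: first match in the association list (keys are Nodup under Pre_)
def pvLookup (agent_paths : List (Int × List (Int × Int))) (agent_id : Int) : List (Int × Int) :=
  ((agent_paths.find? (fun p => p.1 == agent_id)).map (·.2)).getD []

def build_positions_per_timestep (agent_paths : List (Int × List (Int × Int))) : List Int × (List (List (Int × Int))) :=
  let agent_ids := PySem.List.sorted (agent_paths.map (·.1)) (fun x => x) false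
  let max_timesteps := ((PySem.List.max? (agent_paths.map (fun p => (p.2.length : Int))) (fun x => x)).getD 0)
  let frame_positions := (PySem.List.pyRange 0 max_timesteps 1).foldl (fun fp timestep =>
    let positions := agent_ids.foldl (fun pos agent_id =>
      let path := pvLookup agent_paths agent_id
      if timestep < (path.length : Int) then
        pos ++ [PySem.List.pyGetD path timestep (0, 0)]
      else
        pos ++ [PySem.List.pyGetD path (-1) (0, 0)]) []
    fp ++ [positions]) []
  (agent_ids, frame_positions)

-- ===== PORT B =====
-- path, padded with its last element up to length mt (Python: path + [path[-1]] * (mt - len(path)))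
def pvPadRow (path : List (Int × Int)) (mt : Int) : List (Int × Int) :=
  if (path.length : Int) = mt then path
  else path ++ List.replicate (mt - (path.length : Int)).toNat (PySem.List.pyGetD path (-1) (0, 0))

-- hand port of zip(*rows) (PySem has only binary zip): each step emits the column of heads and
-- advances every iterator (tail); exact here because all rows have equal length max_timesteps
-- (zip stops at the shortest row), which is the fuel
def pvPeel : Nat → List (List (Int × Int)) → List (List (Int × Int))
  | 0, _ => []
  | n + 1, rows =>
      (rows.map (fun row => row.headD (0, 0))) :: pvPeel n (rows.map (fun row => row.tail))

def build_positions_per_timestep_alt (agent_paths : List (Int × List (Int × Int))) : List Int × (List (List (Int × Int))) :=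
  let agent_ids := PySem.List.sorted (agent_paths.map (·.1)) (fun x => x) false
  let max_timesteps := ((PySem.List.max? (agent_paths.map (fun p => (p.2.length : Int))) (fun x => x)).getD 0)
  let rows := (PySem.List.sorted agent_paths (fun kv => kv.1) false).map (fun kv => pvPadRow kv.2 max_timesteps)
  (agent_ids, pvPeel max_timesteps.toNat rows)

-- ===== PRECONDITION & SPEC =====
-- Pre_ excludes exactly the inputs where the Python A raises: the empty dict (ValueError from max())
-- and dicts mixing empty with non-empty paths (IndexError from path[-1]); Nodup keys is just the
-- association-list representation of a Python dict.
def Pre_build_positions_per_timestep (agent_paths : List (Int × List (Int × Int))) : Prop :=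
  agent_paths ≠ [] ∧ (agent_paths.map (·.1)).Nodup ∧
    ((∀ p ∈ agent_paths, p.2 = []) ∨ (∀ p ∈ agent_paths, p.2 ≠ []))
instance (agent_paths : List (Int × List (Int × Int))) : Decidable (Pre_build_positions_per_timestep agent_paths) := by unfold Pre_build_positions_per_timestep; infer_instance

def pvWitness_build_positions_per_timestep : (List (Int × List (Int × Int))) :=
  [(2, [(0, 0), (1, 0)]), (1, [(3, 3)])]

def Spec_build_positions_per_timestep (agent_paths : List (Int × List (Int × Int))) (out : List Int × (List (List (Int × Int)))) : Prop := out = build_positions_per_timestep_alt agent_paths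
instance (agent_paths : List (Int × List (Int × Int))) (out : List Int × (List (List (Int × Int)))) : Decidable (Spec_build_positions_per_timestep agent_paths out) := by unfold Spec_build_positions_per_timestep; infer_instance

-- ===== CLAIM (what is proved, stated in full; the proofs are below) =====
def Claim_equal_build_positions_per_timestep : Prop := ∀ (agent_paths : List (Int × List (Int × Int))), Dom_build_positions_per_timestep agent_paths → Pre_build_positions_per_timestep agent_paths → Spec_build_positions_per_timestep agent_paths (build_positions_per_timestep agent_paths)

-- ===== LEMMAS AND PROOFS =====

-- with Nodup keys, find? on the key of a member returns that member
theorem find_self (ap : List (Int × List (Int × Int))) (hnd : (ap.map (·.1)).Nodup)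
    (kv : Int × List (Int × Int)) (hkv : kv ∈ ap) :
    ap.find? (fun p => p.1 == kv.1) = some kv := by
  induction ap with
  | nil => cases hkv
  | cons hd tl ih =>
    simp only [List.map_cons, List.nodup_cons] at hnd
    rcases List.mem_cons.mp hkv with h | h
    · subst h; simp
    · rw [List.find?_cons_of_neg]
      · exact ih hnd.2 h
      · simp only [beq_iff_eq]
        intro he
        exact hnd.1 (he ▸ List.mem_map.mpr ⟨kv, h, rfl⟩)

-- sorted keys = keys of the key-sorted items (keys Nodup)
theorem sorted_keys_eq (ap : List (Int × List (Int × Int))) (hnd : (ap.map (·.1)).Nodup) :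
    PySem.List.sorted (ap.map (·.1)) (fun x => x) false
      = (PySem.List.sorted ap (fun kv => kv.1) false).map (·.1) := by
  have hperm : ((PySem.List.sorted ap (fun kv => kv.1) false).map (·.1)).Perm (ap.map (·.1)) :=
    (PySem.List.sorted_perm ap (fun kv => kv.1) false).map _
  have hle : ((PySem.List.sorted ap (fun kv => kv.1) false).map (·.1)).Pairwise (· ≤ ·) :=
    PySem.List.sorted_map_key_pairwise ap (fun kv => kv.1)
  have hnd' : ((PySem.List.sorted ap (fun kv => kv.1) false).map (·.1)).Nodup :=
    (hperm.nodup_iff).mpr hnd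
  exact PySem.List.sorted_eq_of_perm_of_pairwise_lt _ _ _ hperm
    ((hle.and hnd').imp (fun h => lt_of_le_of_ne h.1 h.2))

-- every looked-up path is no longer than max_timesteps
theorem lookup_len_le (ap : List (Int × List (Int × Int))) (hne : ap ≠ []) (id : Int) :
    ((pvLookup ap id).length : Int)
      ≤ ((PySem.List.max? (ap.map (fun p => (p.2.length : Int))) (fun x => x)).getD 0) := by
  obtain ⟨m, hm⟩ : ∃ m, PySem.List.max? (ap.map (fun p => (p.2.length : Int))) (fun x => x) = some m := by
    rcases h : PySem.List.max? (ap.map (fun p => (p.2.length : Int))) (fun x => x) with _ | m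
    · rw [PySem.List.max?_eq_none_iff] at h
      simp at h; exact absurd h hne
    · exact ⟨m, h⟩
  rw [hm]; simp only [Option.getD_some]
  have hmax := PySem.List.max?_isMax hm
  unfold pvLookup
  rcases hf : ap.find? (fun p => p.1 == id) with _ | pr
  · simp only [hf, Option.map_none, Option.getD_none, List.length_nil, Int.natCast_zero]
    have hmem := PySem.List.max?_mem hm
    simp only [List.mem_map] at hmem
    obtain ⟨p, _, hp⟩ := hmem
    subst hp; positivity
  · simp only [hf, Option.map_some, Option.getD_some]
    exact hmax _ (List.mem_map.mpr ⟨pr, List.mem_of_find?_eq_some hf, rfl⟩)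

theorem max_nonneg (ap : List (Int × List (Int × Int))) (_hne : ap ≠ []) :
    0 ≤ ((PySem.List.max? (ap.map (fun p => (p.2.length : Int))) (fun x => x)).getD 0) := by
  rcases h : PySem.List.max? (ap.map (fun p => (p.2.length : Int))) (fun x => x) with _ | m
  · rw [h]; simp
  · rw [h]
    simp only [Option.getD_some]
    have hmem := PySem.List.max?_mem h
    simp only [List.mem_map] at hmem
    obtain ⟨p, _, hp⟩ := hmem
    subst hp; positivity

theorem pad_len (path : List (Int × Int)) (mt : Int) (h : (path.length : Int) ≤ mt) :
    (pvPadRow path mt).length = mt.toNat := by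
  unfold pvPadRow
  split_ifs with he
  · omega
  · simp only [List.length_append, List.length_replicate]; omega

-- A's per-agent element at timestep t equals indexing the padded row at t
theorem pad_get (path : List (Int × Int)) (mt t : Int)
    (hlen : (path.length : Int) ≤ mt) (ht0 : 0 ≤ t) (htm : t < mt) :
    (if t < (path.length : Int) then PySem.List.pyGetD path t (0,0)
     else PySem.List.pyGetD path (-1) (0,0))
    = PySem.List.pyGetD (pvPadRow path mt) t (0,0) := by
  unfold pvPadRow
  by_cases hmt : (path.length : Int) = mt
  · rw [if_pos hmt, if_pos (by omega)]
  · rw [if_neg hmt]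
    have hlt : (path.length : Int) < mt := lt_of_le_of_ne hlen hmt
    have hl : (((path ++ List.replicate (mt - (path.length : Int)).toNat
        (PySem.List.pyGetD path (-1) (0, 0))).length : Int)) = mt := by
      push_cast [List.length_append, List.length_replicate]
      omega
    by_cases h1 : t < (path.length : Int)
    · rw [if_pos h1, PySem.List.pyGetD_eq_getElem path (0, 0) ht0 h1,
        PySem.List.pyGetD_eq_getElem _ (0, 0) ht0 (by omega),
        List.getElem_append_left (by omega)]
    · rw [if_neg h1,
        PySem.List.pyGetD_eq_getElem _ _ ht0 (by omega),
        List.getElem_append_right (by omega)]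
      simp

-- the peel loop is the transpose: frame t = the t-th element of each (long-enough) row
theorem peel_eq (n : Nat) (rows : List (List (Int × Int))) (h : ∀ r ∈ rows, n ≤ r.length) :
    pvPeel n rows
      = (List.range n).map (fun (t : Nat) => rows.map (fun r => PySem.List.pyGetD r (t : Int) (0,0))) := by
  induction n generalizing rows with
  | zero => simp [pvPeel]
  | succ n ih =>
    rw [pvPeel, List.range_succ_eq_map, List.map_cons, List.map_map]
    refine List.cons_eq_cons.mpr ⟨?_, ?_⟩
    · refine List.map_congr_left ?_
      intro r hr
      have hlen := h r hr
      rw [PySem.List.pyGetD_eq_getElem _ (0, 0) (by omega) (by push_cast; omega)]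
      cases r with
      | nil => simp at hlen
      | cons x xs => rfl
    · rw [ih _ (by
        intro r hr
        simp only [List.mem_map] at hr
        obtain ⟨r0, hr0, he⟩ := hr
        subst he
        have := h r0 hr0
        rw [← List.drop_one, List.length_drop]
        omega)]
      refine List.map_congr_left ?_
      intro t ht
      rw [List.mem_range] at ht
      simp only [Function.comp, List.map_map]
      refine List.map_congr_left ?_
      intro r hr
      have hlen := h r hr
      simp only [Function.comp_apply]
      rw [← List.drop_one]
      have hld : (r.drop 1).length = r.length - 1 := List.length_drop
      rw [PySem.List.pyGetD_eq_getElem _ (0, 0) (by omega) (by omega),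
          PySem.List.pyGetD_eq_getElem _ (0, 0) (by omega) (by omega)]
      simp only [Int.toNat_natCast]
      rw [List.getElem_drop]
      congr 1
      omega

theorem ports_eq (ap : List (Int × List (Int × Int))) (hne : ap ≠ [])
    (hnd : (ap.map (·.1)).Nodup) :
    build_positions_per_timestep ap = build_positions_per_timestep_alt ap := by
  unfold build_positions_per_timestep build_positions_per_timestep_alt
  refine Prod.ext rfl ?_
  simp only
  set mt := ((PySem.List.max? (ap.map (fun p => (p.2.length : Int))) (fun x => x)).getD 0) with hmt
  set srt := PySem.List.sorted ap (fun kv => kv.1) false with hsrt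
  have hmt0 : 0 ≤ mt := max_nonneg ap hne
  -- A's frame list as a map
  rw [PySem.List.foldl_append_singleton_eq_map, List.nil_append]
  have hfun : ∀ t : Int, (fun (pos : List (Int × Int)) (agent_id : Int) =>
      let path := pvLookup ap agent_id
      if t < (path.length : Int) then pos ++ [PySem.List.pyGetD path t (0, 0)]
      else pos ++ [PySem.List.pyGetD path (-1) (0, 0)])
      = (fun pos agent_id =>
        pos ++ [let path := pvLookup ap agent_id
          if t < (path.length : Int) then PySem.List.pyGetD path t (0, 0)
          else PySem.List.pyGetD path (-1) (0, 0)]) := by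
    intro t; funext pos agent_id
    by_cases h : t < ((pvLookup ap agent_id).length : Int) <;> simp [h]
  -- B's frame list via the transpose lemma
  rw [peel_eq mt.toNat _ (by
    intro r hr
    simp only [List.mem_map] at hr
    obtain ⟨kv, hkv, he⟩ := hr
    subst he
    have hkv' : kv ∈ ap := (PySem.List.mem_sorted _ _ _ _).mp hkv
    have hlk : pvLookup ap kv.1 = kv.2 := by
      unfold pvLookup; rw [find_self ap hnd kv hkv']; rfl
    have := lookup_len_le ap hne kv.1
    rw [hlk] at this
    rw [pad_len kv.2 mt this])]
  rw [show PySem.List.pyRange 0 mt 1 = (List.range mt.toNat).map (fun (k : Nat) => (k : Int)) by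
    rw [PySem.List.pyRange_one]
    norm_num, List.map_map]
  refine List.map_congr_left ?_
  intro tn htn
  rw [List.mem_range] at htn
  simp only [Function.comp]
  rw [hfun, PySem.List.foldl_append_singleton_eq_map, List.nil_append,
    sorted_keys_eq ap hnd, ← hsrt, List.map_map, List.map_map]
  refine List.map_congr_left ?_
  intro kv hkv
  simp only [Function.comp]
  have hkv' : kv ∈ ap := (PySem.List.mem_sorted _ _ _ _).mp hkv
  have hlk : pvLookup ap kv.1 = kv.2 := by
    unfold pvLookup; rw [find_self ap hnd kv hkv']; rfl
  rw [hlk]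
  have hle := lookup_len_le ap hne kv.1
  rw [hlk] at hle
  exact pad_get kv.2 mt tn hle (by omega) (by omega)

-- ===== VERDICT (by name: the statement is the Claim_ definition above) =====
theorem build_positions_per_timestep_spec : Claim_equal_build_positions_per_timestep := by
  intro ap _ hpre
  exact ports_eq ap hpre.1 hpre.2.1
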